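-- pv_equiv track=rewrite | github.com/alexanderbenadyieu/eurlex-scraper | summarization/analyze_documents.py | find_tier_examples
-- ===== SOURCE A (Python) =====
-- from typing import Dict, List, Tuple
--
-- def find_tier_examples(doc_lengths: Dict[str, int], num_per_tier: int = 3) -> Dict[str, List[str]]:
--     """Find example documents for each tier.
--
--     Args:
--         doc_lengths: Dict mapping document_id to word count
--         num_per_tier: Number of examples to find per tier
--
--     Returns:
--         Dict mapping tier name to list of document IDs
--     """
--     tier_ranges = {
--         'tier1': (0, 600),
--         'tier2': (601, 2500),
--         'tier3': (2501, 20000),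
--         'tier4': (20001, 68000)
--     }
--
--     # Group documents by tier
--     tier_docs = {tier: [] for tier in tier_ranges}
--     for doc_id, length in doc_lengths.items():
--         for tier, (min_len, max_len) in tier_ranges.items():
--             if min_len <= length <= max_len:
--                 tier_docs[tier].append((doc_id, length))
--                 break
--
--     # Select random examples for each tier
--     examples = {}
--     for tier, docs in tier_docs.items():
--         if docs:
--             # Sort by length to get a spread
--             docs.sort(key=lambda x: x[1])
--             step = len(docs) // num_per_tier
--             if step == 0:
--                 selected = docs
--             else:
--                 # Take evenly spaced samples
--                 selected = docs[::step][:num_per_tier]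
--             examples[tier] = [(doc_id, length) for doc_id, length in selected]
--         else:
--             examples[tier] = []
--
--     return examples
-- ===== SOURCE B (Python) =====
-- def find_tier_examples(doc_lengths, num_per_tier=3):
--     """Counting-sort approach: hash lengths to doc-id lists, then read lengths in
--     increasing numeric order per tier; no comparison sort anywhere."""
--     groups = {}
--     for doc_id, length in doc_lengths.items():
--         groups.setdefault(length, []).append(doc_id)
--     examples = {}
--     for tier, lo, hi in (('tier1', 0, 600), ('tier2', 601, 2500),
--                          ('tier3', 2501, 20000), ('tier4', 20001, 68000)):
--         docs = [(doc_id, v) for v in range(lo, hi + 1) for doc_id in groups.get(v, [])]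
--         if not docs:
--             examples[tier] = []
--             continue
--         step = len(docs) // num_per_tier
--         examples[tier] = docs if step == 0 else docs[::step][:num_per_tier]
--     return examples
-- ===== Notes on version B (the rewrite author's own statement) =====
-- stated objective: alternative
-- what changed: B replaces A's bucket-then-comparison-sort-per-tier with a counting sort: one pass builds a hash map length -> list of doc ids (insertion order), and each tier's sorted doc list is read off by walking the tier's numeric length range in increasing order; the spaced-sample selection is unchanged.
import Mathlib
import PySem

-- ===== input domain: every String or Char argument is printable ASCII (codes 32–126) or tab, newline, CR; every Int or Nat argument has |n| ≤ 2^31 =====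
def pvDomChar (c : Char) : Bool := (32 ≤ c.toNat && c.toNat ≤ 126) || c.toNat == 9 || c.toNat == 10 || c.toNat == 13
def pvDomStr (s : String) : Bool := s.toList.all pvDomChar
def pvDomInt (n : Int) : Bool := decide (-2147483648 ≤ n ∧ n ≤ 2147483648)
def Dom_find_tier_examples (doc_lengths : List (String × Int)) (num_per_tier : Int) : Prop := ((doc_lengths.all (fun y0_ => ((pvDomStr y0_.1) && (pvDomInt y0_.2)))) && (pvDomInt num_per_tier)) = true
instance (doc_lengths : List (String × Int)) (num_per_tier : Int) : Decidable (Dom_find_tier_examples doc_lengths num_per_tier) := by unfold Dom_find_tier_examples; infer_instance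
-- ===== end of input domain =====

-- B replaces A's bucket-then-comparison-sort-each-tier with a counting sort: a hash map
-- length -> doc ids built in one pass, each tier read off by walking its numeric length range.

-- ===== PORT A =====
-- The inner `for tier, (min_len, max_len) in tier_ranges.items(): if …: append; break` over the
-- literal tier table, as the four per-tier accumulators (tier1, tier2, tier3, tier4).
def pvClassify
    (acc : List (String × Int) × List (String × Int) × List (String × Int) × List (String × Int))
    (x : String × Int) :
    List (String × Int) × List (String × Int) × List (String × Int) × List (String × Int) :=
  if 0 ≤ x.2 ∧ x.2 ≤ 600 then (acc.1 ++ [x], acc.2.1, acc.2.2.1, acc.2.2.2)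
  else if 601 ≤ x.2 ∧ x.2 ≤ 2500 then (acc.1, acc.2.1 ++ [x], acc.2.2.1, acc.2.2.2)
  else if 2501 ≤ x.2 ∧ x.2 ≤ 20000 then (acc.1, acc.2.1, acc.2.2.1 ++ [x], acc.2.2.2)
  else if 20001 ≤ x.2 ∧ x.2 ≤ 68000 then (acc.1, acc.2.1, acc.2.2.1, acc.2.2.2 ++ [x])
  else acc

-- `step = len(docs) // num_per_tier; docs if step == 0 else docs[::step][:num_per_tier]`
-- (this selection code is textually the same in A and in B; only reached on non-empty docs).
def pvPick (docs : List (String × Int)) (n : Int) : List (String × Int) :=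
  let step := PySem.Int.floordiv (docs.length : Int) n
  if step = 0 then docs
  else PySem.List.slice ((PySem.List.slice? docs none none step).getD []) none (some n)

def find_tier_examples (doc_lengths : List (String × Int)) (num_per_tier : Int) :
    List (String × List (String × Int)) :=
  let td := doc_lengths.foldl pvClassify ([], [], [], [])
  -- per tier: if docs: docs.sort(key=λx:x[1]); … ; [(doc_id, length) for doc_id, length in selected]
  [("tier1", if td.1 = [] then [] else
      (pvPick (PySem.List.sorted td.1 (fun x => x.2)) num_per_tier).map (fun p => (p.1, p.2))),
   ("tier2", if td.2.1 = [] then [] else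
      (pvPick (PySem.List.sorted td.2.1 (fun x => x.2)) num_per_tier).map (fun p => (p.1, p.2))),
   ("tier3", if td.2.2.1 = [] then [] else
      (pvPick (PySem.List.sorted td.2.2.1 (fun x => x.2)) num_per_tier).map (fun p => (p.1, p.2))),
   ("tier4", if td.2.2.2 = [] then [] else
      (pvPick (PySem.List.sorted td.2.2.2 (fun x => x.2)) num_per_tier).map (fun p => (p.1, p.2)))]

-- ===== PORT B =====
def find_tier_examples_alt (doc_lengths : List (String × Int)) (num_per_tier : Int) :
    List (String × List (String × Int)) :=
  -- groups.setdefault(length, []).append(doc_id)  ==  groups[length] = groups.get(length, []) + [doc_id]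
  let groups := doc_lengths.foldl (fun d x => d.modify x.2 [] (fun l => l ++ [x.1])) PySem.Dict.empty
  -- docs = [(doc_id, v) for v in range(lo, hi+1) for doc_id in groups.get(v, [])]
  let docs := fun (lo hi : Int) =>
    (PySem.List.pyRange lo (hi + 1)).flatMap (fun v => (groups.getD v []).map (fun id => (id, v)))
  let sel := fun (ds : List (String × Int)) => if ds = [] then [] else pvPick ds num_per_tier
  [("tier1", sel (docs 0 600)), ("tier2", sel (docs 601 2500)),
   ("tier3", sel (docs 2501 20000)), ("tier4", sel (docs 20001 68000))]

-- ===== PRECONDITION & SPEC =====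
-- Pre_ excludes exactly the inputs where Python A raises ZeroDivisionError:
-- num_per_tier == 0 while some document length falls in a tier range (0..68000).
def Pre_find_tier_examples (doc_lengths : List (String × Int)) (num_per_tier : Int) : Prop :=
  num_per_tier ≠ 0 ∨ doc_lengths.all (fun x => decide (x.2 < 0 ∨ 68000 < x.2)) = true
instance (doc_lengths : List (String × Int)) (num_per_tier : Int) : Decidable (Pre_find_tier_examples doc_lengths num_per_tier) := by unfold Pre_find_tier_examples; infer_instance

def pvWitness_find_tier_examples : (List (String × Int)) × Int := ([("doc1", 100), ("doc2", 3000)], 3)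

def Spec_find_tier_examples (doc_lengths : List (String × Int)) (num_per_tier : Int) (out : List (String × List (String × Int))) : Prop := out = find_tier_examples_alt doc_lengths num_per_tier
instance (doc_lengths : List (String × Int)) (num_per_tier : Int) (out : List (String × List (String × Int))) : Decidable (Spec_find_tier_examples doc_lengths num_per_tier out) := by unfold Spec_find_tier_examples; infer_instance

-- ===== CLAIM (what is proved, stated in full; the proofs are below) =====
def Claim_equal_find_tier_examples : Prop := ∀ (doc_lengths : List (String × Int)) (num_per_tier : Int), Dom_find_tier_examples doc_lengths num_per_tier → Pre_find_tier_examples doc_lengths num_per_tier → Spec_find_tier_examples doc_lengths num_per_tier (find_tier_examples doc_lengths num_per_tier)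

-- ===== LEMMAS AND PROOFS =====

def pvT1 (x : String × Int) : Bool := decide (0 ≤ x.2 ∧ x.2 ≤ 600)
def pvT2 (x : String × Int) : Bool := decide (601 ≤ x.2 ∧ x.2 ≤ 2500)
def pvT3 (x : String × Int) : Bool := decide (2501 ≤ x.2 ∧ x.2 ≤ 20000)
def pvT4 (x : String × Int) : Bool := decide (20001 ≤ x.2 ∧ x.2 ≤ 68000)

-- A's bucketing fold computes the four tier filters (the ranges are disjoint, so the
-- first-match/break chain is four independent filters)
theorem pvClassify_eq (xs : List (String × Int))
    (acc : List (String × Int) × List (String × Int) × List (String × Int) × List (String × Int)) :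
    xs.foldl pvClassify acc =
      (acc.1 ++ xs.filter pvT1, acc.2.1 ++ xs.filter pvT2,
       acc.2.2.1 ++ xs.filter pvT3, acc.2.2.2 ++ xs.filter pvT4) := by
  induction xs generalizing acc with
  | nil => simp
  | cons x xs ih =>
    simp only [List.foldl_cons, pvClassify]
    split_ifs with h1 h2 h3 h4 <;>
      rw [ih] <;>
      simp only [List.filter_cons, pvT1, pvT2, pvT3, pvT4, decide_eq_true_eq] <;>
      [ (rw [if_pos h1, if_neg (by omega), if_neg (by omega), if_neg (by omega)]);
        (rw [if_neg h1, if_pos h2, if_neg (by omega), if_neg (by omega)]);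
        (rw [if_neg h1, if_neg h2, if_pos h3, if_neg (by omega)]);
        (rw [if_neg h1, if_neg h2, if_neg h3, if_pos h4]);
        (rw [if_neg h1, if_neg h2, if_neg h3, if_neg h4]) ] <;>
      simp [List.append_assoc]

-- B's grouping dict: groups[v] is the doc ids with length v, in input order
theorem pvGroups_getD (xs : List (String × Int)) (v : Int) :
    (xs.foldl (fun d x => d.modify x.2 [] (fun l => l ++ [x.1])) PySem.Dict.empty).getD v [] =
      (xs.filter (fun x => x.2 == v)).map (fun x => x.1) := by
  have h : xs.foldl (fun d x => d.modify x.2 [] (fun l => l ++ [x.1])) PySem.Dict.empty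
      = (xs.map (fun x => (x.2, x.1))).foldl
          (fun d p => d.modify p.1 [] (fun l => l ++ [p.2])) PySem.Dict.empty := by
    rw [List.foldl_map]
  rw [h, PySem.Dict.getD_foldl_modify_append]
  simp [List.filter_map, List.map_map, Function.comp_def]

theorem pvInsertBy_all_lt {α : Type} (before : α → α → Bool) (x : α) (ys : List α)
    (h : ∀ z ∈ ys, before x z = true) :
    PySem.List.insertBy before x ys = x :: ys := by
  cases ys with
  | nil => rfl
  | cons y ys => simp [PySem.List.insertBy, h y (by simp)]

theorem pvInsertBy_prefix {α : Type} (before : α → α → Bool) (x : α) (P Q : List α)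
    (h : ∀ a ∈ P, before x a = false) :
    PySem.List.insertBy before x (P ++ Q) = P ++ PySem.List.insertBy before x Q := by
  induction P with
  | nil => rfl
  | cons p P ih =>
    simp only [List.cons_append, PySem.List.insertBy, h p (by simp)]
    simp only [Bool.false_eq_true, if_false, List.cons.injEq, true_and]
    exact ih (fun a ha => h a (by simp [ha]))

-- core: the stable sort of a range-filtered list IS the counting-sort read-off
theorem pvSortedFilter (lo hi : Int) (xs : List (String × Int)) :
    PySem.List.sorted (xs.filter (fun x => decide (lo ≤ x.2 ∧ x.2 ≤ hi))) (fun x => x.2) =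
      (PySem.List.pyRange lo (hi + 1)).flatMap (fun v => xs.filter (fun x => x.2 == v)) := by
  induction xs using List.reverseRecOn with
  | nil => simp [PySem.List.sorted_eq_foldl_insertBy]
  | append_singleton ys x ih =>
    have hfa : ∀ (p : (String × Int) → Bool), (ys ++ [x]).filter p =
        ys.filter p ++ (if p x then [x] else []) := by
      intro p; rw [List.filter_append]; cases hpx : p x <;> simp [hpx]
    by_cases hin : lo ≤ x.2 ∧ x.2 ≤ hi
    · -- x lands in this range: sort inserts it at the end of its key group
      have hstep : PySem.List.sorted (ys.filter (fun x => decide (lo ≤ x.2 ∧ x.2 ≤ hi)) ++ [x])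
            (fun x => x.2) =
          PySem.List.insertBy (fun a b => decide (a.2 < b.2)) x
            (PySem.List.sorted (ys.filter (fun x => decide (lo ≤ x.2 ∧ x.2 ≤ hi))) (fun x => x.2)) := by
        rw [PySem.List.sorted_eq_foldl_insertBy, PySem.List.sorted_eq_foldl_insertBy,
          List.foldl_append]
        rfl
      rw [hfa, if_pos (by simpa using hin), hstep, ih]
      -- split the range at x.2
      have hsplit : PySem.List.pyRange lo (hi + 1) =
          PySem.List.pyRange lo x.2 ++ (x.2 :: PySem.List.pyRange (x.2 + 1) (hi + 1)) := by
        rw [PySem.List.pyRange_one_append lo x.2 (hi + 1) hin.1 (by omega),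
          PySem.List.pyRange_one_cons (a := x.2) (b := hi + 1) (by omega)]
      rw [hsplit]
      simp only [List.flatMap_append, List.flatMap_cons]
      -- insert x after the groups of keys ≤ x.2, before the groups of keys > x.2
      rw [← List.append_assoc, pvInsertBy_prefix _ x
        ((PySem.List.pyRange lo x.2).flatMap (fun v => ys.filter (fun x => x.2 == v)) ++
          ys.filter (fun y => y.2 == x.2)) _ ?hle,
        pvInsertBy_all_lt _ x _ ?hgt]
      · -- reassemble: groups below x.2 unchanged, group of x.2 gains x, groups above unchanged
        have hlow : ((PySem.List.pyRange lo x.2).flatMap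
            (fun v => (ys ++ [x]).filter (fun x => x.2 == v))) =
            (PySem.List.pyRange lo x.2).flatMap (fun v => ys.filter (fun x => x.2 == v)) := by
          refine List.flatMap_congr (fun v hv => ?_)
          have := PySem.List.mem_pyRange_one.mp hv
          rw [hfa, if_neg (by simp; omega)]; simp
        have hhigh : ((PySem.List.pyRange (x.2 + 1) (hi + 1)).flatMap
            (fun v => (ys ++ [x]).filter (fun x => x.2 == v))) =
            (PySem.List.pyRange (x.2 + 1) (hi + 1)).flatMap (fun v => ys.filter (fun x => x.2 == v)) := by
          refine List.flatMap_congr (fun v hv => ?_)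
          have := PySem.List.mem_pyRange_one.mp hv
          rw [hfa, if_neg (by simp; omega)]; simp
        have hmid : (ys ++ [x]).filter (fun y => y.2 == x.2) =
            ys.filter (fun y => y.2 == x.2) ++ [x] := by
          rw [hfa, if_pos (by simp)]
        rw [hlow, hhigh, hmid]
        simp [List.append_assoc]
      case hle =>
        intro a ha
        rcases List.mem_append.mp ha with hlow | hmid
        · rcases List.mem_flatMap.mp hlow with ⟨v, hv, hav⟩
          have h1 := PySem.List.mem_pyRange_one.mp hv
          have h2 := (List.mem_filter.mp hav).2
          simp only [beq_iff_eq] at h2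
          simp; omega
        · have h2 := (List.mem_filter.mp hmid).2
          simp only [beq_iff_eq] at h2
          simp; omega
      case hgt =>
        intro z hz
        rcases List.mem_flatMap.mp hz with ⟨v, hv, hzv⟩
        have h1 := PySem.List.mem_pyRange_one.mp hv
        have h2 := (List.mem_filter.mp hzv).2
        simp only [beq_iff_eq] at h2
        simp; omega
    · -- x outside the range: nothing changes on either side
      rw [hfa, if_neg (by simpa using hin)]
      rw [List.append_nil, ih]
      refine (List.flatMap_congr (fun v hv => ?_)).symm
      have := PySem.List.mem_pyRange_one.mp hv
      rw [hfa, if_neg (by simp; omega)]; simp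

-- the read-off of group v, re-paired with v, is exactly the filter on key v
theorem pvGroupRepair (xs : List (String × Int)) (v : Int) :
    ((xs.filter (fun x => x.2 == v)).map (fun x => x.1)).map (fun id => (id, v)) =
      xs.filter (fun x => x.2 == v) := by
  rw [List.map_map]
  have h : ∀ a ∈ xs.filter (fun x => x.2 == v),
      ((fun id => (id, v)) ∘ fun x => x.1) a = id a := by
    intro a ha
    have := (List.mem_filter.mp ha).2
    simp only [beq_iff_eq] at this
    simp [Function.comp, ← this]
  rw [List.map_congr_left h, List.map_id]

theorem pvMap_eta (xs : List (String × Int)) : xs.map (fun p => (p.1, p.2)) = xs := by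
  simp

-- per-tier agreement, abstracted over the tier bounds
theorem pvTier (xs : List (String × Int)) (n lo hi : Int) :
    (if xs.filter (fun x => decide (lo ≤ x.2 ∧ x.2 ≤ hi)) = [] then [] else
      (pvPick (PySem.List.sorted (xs.filter (fun x => decide (lo ≤ x.2 ∧ x.2 ≤ hi))) (fun x => x.2)) n).map
        (fun p => (p.1, p.2))) =
    (if ((PySem.List.pyRange lo (hi + 1)).flatMap
          (fun v => ((xs.foldl (fun d x => d.modify x.2 [] (fun l => l ++ [x.1])) PySem.Dict.empty).getD v []).map
            (fun id => (id, v)))) = [] then []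
      else pvPick ((PySem.List.pyRange lo (hi + 1)).flatMap
          (fun v => ((xs.foldl (fun d x => d.modify x.2 [] (fun l => l ++ [x.1])) PySem.Dict.empty).getD v []).map
            (fun id => (id, v)))) n) := by
  have hdocs : ((PySem.List.pyRange lo (hi + 1)).flatMap
        (fun v => ((xs.foldl (fun d x => d.modify x.2 [] (fun l => l ++ [x.1])) PySem.Dict.empty).getD v []).map
          (fun id => (id, v)))) =
      PySem.List.sorted (xs.filter (fun x => decide (lo ≤ x.2 ∧ x.2 ≤ hi))) (fun x => x.2) := by
    rw [pvSortedFilter]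
    refine List.flatMap_congr (fun v _ => ?_)
    rw [pvGroups_getD, pvGroupRepair]
  rw [hdocs]
  by_cases hys : xs.filter (fun x => decide (lo ≤ x.2 ∧ x.2 ≤ hi)) = []
  · have : PySem.List.sorted (xs.filter (fun x => decide (lo ≤ x.2 ∧ x.2 ≤ hi))) (fun x : String × Int => x.2) = [] := by
      rw [PySem.List.sorted_eq_nil_iff]; exact hys
    rw [if_pos hys, if_pos this]
  · have : PySem.List.sorted (xs.filter (fun x => decide (lo ≤ x.2 ∧ x.2 ≤ hi))) (fun x : String × Int => x.2) ≠ [] := by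
      rw [Ne, PySem.List.sorted_eq_nil_iff]; exact hys
    rw [if_neg hys, if_neg this, pvMap_eta]

-- ===== VERDICT (by name: the statement is the Claim_ definition above) =====
theorem find_tier_examples_spec : Claim_equal_find_tier_examples := by
  intro dl n _ _
  unfold Spec_find_tier_examples find_tier_examples find_tier_examples_alt
  simp only [pvClassify_eq, List.nil_append]
  unfold pvT1 pvT2 pvT3 pvT4
  rw [pvTier dl n 0 600, pvTier dl n 601 2500, pvTier dl n 2501 20000, pvTier dl n 20001 68000]
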